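-- pv_equiv track=rewrite | github.com/mabaer/nltk | movie_review_classifier.py | getSet
-- ===== SOURCE A (Python) =====
-- def getSet(words):
--     # Define positive and negative words
--     positiveWords = ["hilarious", "terrific", "wonderful", "good", "great", "best","excellent", " perfect", "brilliant", "well", "interesting", "greatest", "super", "better"]
--     negativeWords = ["idiotic", "stupidity", "ludicrous", "boring", "bad", "worse", "worst", "poor", "long", " terrible", "weak", "horrible", " ridiculous", "stupid"]
--     features = {}
--     countPos = 0
--     countNeg = 0
--     for token in words.keys():
--         # Interprete the occurence of the token
--         if words[token] < 2:
--             features[token] = "exist"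
--         elif words[token] >= 2 and words[token] < 4:
--             features[token] = "sometimes"
--         else:
--             features[token] = "often"
--         # Check if it is a positive or a negative word
--         if token in positiveWords:
--             countPos += 1
--         if token in negativeWords:
--             countNeg += 1
--
--     if countPos >= countNeg:
--         features['guess'] = "positive"
--     elif countNeg > countPos:
--         features['guess'] = "negative"
--     return features
-- ===== SOURCE B (Python) =====
-- def getSet(words):
--     positiveWords = ["hilarious", "terrific", "wonderful", "good", "great", "best","excellent", " perfect", "brilliant", "well", "interesting", "greatest", "super", "better"]
--     negativeWords = ["idiotic", "stupidity", "ludicrous", "boring", "bad", "worse", "worst", "poor", "long", " terrible", "weak", "horrible", " ridiculous", "stupid"]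
--
--     def bucket(v):
--         return "exist" if v < 2 else ("sometimes" if v < 4 else "often")
--
--     # one pass over the items fills the buckets
--     features = {token: bucket(v) for token, v in words.items()}
--     # counts by scanning the two fixed vocabularies against the dict
--     countPos = sum(1 for w in positiveWords if w in words)
--     countNeg = sum(1 for w in negativeWords if w in words)
--     features['guess'] = "positive" if countPos >= countNeg else "negative"
--     return features
-- ===== Notes on version B (the rewrite author's own statement) =====
-- stated objective: faster
-- what changed: B replaces A's single combined loop (which carries the features dict and two counters through every token) by a dict comprehension for the buckets plus two scans over the fixed 14-word vocabulary lists, counting which vocabulary words occur in the dict instead of testing every token against both vocabularies.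
import Mathlib
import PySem

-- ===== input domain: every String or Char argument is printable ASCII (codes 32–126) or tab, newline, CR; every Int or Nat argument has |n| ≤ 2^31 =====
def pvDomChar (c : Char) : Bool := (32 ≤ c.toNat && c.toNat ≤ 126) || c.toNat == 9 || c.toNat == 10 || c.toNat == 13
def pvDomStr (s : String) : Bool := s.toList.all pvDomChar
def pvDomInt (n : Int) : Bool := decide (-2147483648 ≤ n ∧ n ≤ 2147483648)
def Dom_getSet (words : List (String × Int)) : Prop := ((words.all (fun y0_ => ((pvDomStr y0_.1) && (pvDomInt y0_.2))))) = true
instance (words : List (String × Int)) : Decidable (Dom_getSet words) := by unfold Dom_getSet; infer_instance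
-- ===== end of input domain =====

-- B replaces A's single combined loop by a bucket pass over the items plus two scans
-- over the fixed vocabulary lists (same result; objective: idiomatic).

-- ===== PORT A =====
def pvPositiveWords : List String := ["hilarious", "terrific", "wonderful", "good", "great", "best", "excellent", " perfect", "brilliant", "well", "interesting", "greatest", "super", "better"]
def pvNegativeWords : List String := ["idiotic", "stupidity", "ludicrous", "boring", "bad", "worse", "worst", "poor", "long", " terrible", "weak", "horrible", " ridiculous", "stupid"]

-- literal port of A: one loop over the dict's keys carrying (features, countPos, countNeg)
def getSet (words : List (String × Int)) : List (String × String) :=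
  let d := PySem.Dict.ofList words
  let st := d.keys.foldl
    (fun (st : PySem.Dict String String × Int × Int) token =>
      let v := d.getD token 0
      let features :=
        if v < 2 then st.1.insert token "exist"
        else if v ≥ 2 ∧ v < 4 then st.1.insert token "sometimes"
        else st.1.insert token "often"
      let cp := if pvPositiveWords.contains token then st.2.1 + 1 else st.2.1
      let cn := if pvNegativeWords.contains token then st.2.2 + 1 else st.2.2
      (features, cp, cn))
    (PySem.Dict.empty, 0, 0)
  let features :=
    if st.2.1 ≥ st.2.2 then st.1.insert "guess" "positive"
    else if st.2.2 > st.2.1 then st.1.insert "guess" "negative"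
    else st.1
  features.items

-- ===== PORT B =====
def pvBucket (v : Int) : String :=
  if v < 2 then "exist" else if v < 4 then "sometimes" else "often"

-- port of B: bucket comprehension over the items, then two vocabulary scans
def getSet_alt (words : List (String × Int)) : List (String × String) :=
  let d := PySem.Dict.ofList words
  let features := PySem.Dict.mk (d.items.map (fun p => (p.1, pvBucket p.2)))
  let countPos : Int := pvPositiveWords.countP (fun w => d.contains w)
  let countNeg : Int := pvNegativeWords.countP (fun w => d.contains w)
  (features.insert "guess" (if countPos ≥ countNeg then "positive" else "negative")).items

-- ===== PRECONDITION & SPEC =====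
def Spec_getSet (words : List (String × Int)) (out : List (String × String)) : Prop := out = getSet_alt words
instance (words : List (String × Int)) (out : List (String × String)) : Decidable (Spec_getSet words out) := by unfold Spec_getSet; infer_instance

-- ===== CLAIM (what is proved, stated in full; the proofs are below) =====
def Claim_equal_getSet : Prop := ∀ (words : List (String × Int)), Dom_getSet words → Spec_getSet words (getSet words)

-- ===== LEMMAS AND PROOFS =====

-- the branch in A's loop body computes exactly the bucket of the value
theorem pv_branch_eq_bucket (f : PySem.Dict String String) (t : String) (v : Int) :
    (if v < 2 then f.insert t "exist"
     else if v ≥ 2 ∧ v < 4 then f.insert t "sometimes"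
     else f.insert t "often") = f.insert t (pvBucket v) := by
  unfold pvBucket
  by_cases h1 : v < 2
  · simp [h1]
  · by_cases h2 : v < 4 <;> simp [h1, h2]

-- A's combined fold splits into the features fold and the two counts
theorem pv_fold_split (d : PySem.Dict String Int) (ks : List String)
    (f : PySem.Dict String String) (cp cn : Int) :
    ks.foldl
      (fun (st : PySem.Dict String String × Int × Int) token =>
        let v := d.getD token 0
        let features :=
          if v < 2 then st.1.insert token "exist"
          else if v ≥ 2 ∧ v < 4 then st.1.insert token "sometimes"
          else st.1.insert token "often"
        let cp := if pvPositiveWords.contains token then st.2.1 + 1 else st.2.1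
        let cn := if pvNegativeWords.contains token then st.2.2 + 1 else st.2.2
        (features, cp, cn))
      (f, cp, cn)
    = (ks.foldl (fun f t => f.insert t (pvBucket (d.getD t 0))) f,
       cp + (ks.countP (fun t => pvPositiveWords.contains t) : Int),
       cn + (ks.countP (fun t => pvNegativeWords.contains t) : Int)) := by
  induction ks generalizing f cp cn with
  | nil => simp
  | cons t ks ih =>
      rw [List.foldl_cons]
      show (List.foldl _ ((if d.getD t 0 < 2 then f.insert t "exist"
          else if d.getD t 0 ≥ 2 ∧ d.getD t 0 < 4 then f.insert t "sometimes"
          else f.insert t "often"),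
          (if pvPositiveWords.contains t then cp + 1 else cp),
          (if pvNegativeWords.contains t then cn + 1 else cn)) ks) = _
      rw [ih, pv_branch_eq_bucket]
      simp only [List.foldl_cons, List.countP_cons, Prod.mk.injEq]
      refine ⟨trivial, ?_, ?_⟩ <;> (split_ifs <;> push_cast <;> ring)

-- counting members of l₂ while scanning l₁ equals counting members of l₁ while scanning l₂ (both Nodup)
theorem pv_countP_comm (l₁ l₂ : List String) (h₁ : l₁.Nodup) (h₂ : l₂.Nodup) :
    l₁.countP (fun t => l₂.contains t) = l₂.countP (fun t => l₁.contains t) := by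
  rw [List.countP_eq_length_filter, List.countP_eq_length_filter]
  apply List.Perm.length_eq
  apply (List.perm_ext_iff_of_nodup (h₁.filter _) (h₂.filter _)).2
  intro x
  simp only [List.mem_filter, List.contains_iff_mem]
  tauto

-- A's features fold over the (distinct, fresh) keys is B's map over the items
theorem pv_features_eq (d : PySem.Dict String Int) (hnd : d.keys.Nodup) :
    d.keys.foldl (fun f t => f.insert t (pvBucket (d.getD t 0))) PySem.Dict.empty
      = PySem.Dict.mk (d.items.map (fun p => (p.1, pvBucket p.2))) := by
  apply PySem.Dict.ext
  have h := PySem.Dict.items_foldl_insert_fresh d.keys (fun t => t)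
      (fun t => pvBucket (d.getD t 0)) PySem.Dict.empty
      (by intro a _; simp [PySem.Dict.contains_empty]) (by simpa using hnd)
  simp only [] at h
  rw [h]
  have hitems : d.items = d.keys.map (fun k => (k, d.getD k 0)) :=
    PySem.Dict.items_eq_map_keys d hnd 0
  simp [hitems, List.map_map, Function.comp_def, PySem.Dict.empty]

-- ===== VERDICT (by name: the statement is the Claim_ definition above) =====
theorem getSet_spec : Claim_equal_getSet := by
  intro words _
  unfold Spec_getSet getSet getSet_alt
  simp only []
  set d := PySem.Dict.ofList words with hd
  have hnd : d.keys.Nodup := PySem.Dict.nodup_keys_ofList words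
  rw [pv_fold_split]
  have hcp : d.keys.countP (fun t => pvPositiveWords.contains t)
      = pvPositiveWords.countP (fun w => d.contains w) := by
    rw [pv_countP_comm d.keys pvPositiveWords hnd (by decide)]
    apply List.countP_congr
    intro w _
    simp [PySem.Dict.contains_iff_mem_keys]
  have hcn : d.keys.countP (fun t => pvNegativeWords.contains t)
      = pvNegativeWords.countP (fun w => d.contains w) := by
    rw [pv_countP_comm d.keys pvNegativeWords hnd (by decide)]
    apply List.countP_congr
    intro w _
    simp [PySem.Dict.contains_iff_mem_keys]
  rw [pv_features_eq d hnd, hcp, hcn]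
  dsimp only
  rw [zero_add, zero_add]
  set cp : Int := (pvPositiveWords.countP (fun w => d.contains w) : Int)
  set cn : Int := (pvNegativeWords.countP (fun w => d.contains w) : Int)
  by_cases h : cp ≥ cn
  · rw [if_pos h, if_pos h]
  · rw [if_neg h, if_pos (by omega), if_neg h]
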